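-- pv_equiv track=rewrite | github.com/kelvinhuang0327/number-pattern-research | tools/backtest_biglotto_comprehensive.py | strat_cold_complement
-- ===== SOURCE A (Python) =====
-- from collections import Counter
--
-- MAX_NUM = 49
--
-- PICK = 6
--
-- def strat_cold_complement(history, num_bets=2):
--     """Top 12 coldest numbers from last 100 draws, split into 2 bets. Deterministic."""
--     window = min(100, len(history))
--     recent = history[-window:]
--     all_nums = [n for d in recent for n in d['numbers']]
--     freq = Counter(all_nums)
--
--     sorted_nums = sorted(range(1, MAX_NUM + 1), key=lambda x: freq.get(x, 0))
--     bets = []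
--     for i in range(num_bets):
--         bets.append(sorted(sorted_nums[i * PICK:(i + 1) * PICK]))
--     return bets
-- ===== SOURCE B (Python) =====
-- MAX_NUM = 49
--
-- PICK = 6
--
-- def strat_cold_complement(history, num_bets=2):
--     """Counting-sort variant: list the numbers by scanning candidate frequencies
--     0..len(nums) in ascending order (numbers ascending within a frequency, which
--     is exactly the stable tie-break), then peel bets off the front iteratively."""
--     window = min(100, len(history))
--     recent = history[len(history) - window:]
--     nums = []
--     for d in recent:
--         nums.extend(d['numbers'])
--     counts = [nums.count(n) for n in range(1, MAX_NUM + 1)]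
--     ordered = []
--     for f in range(0, len(nums) + 1):
--         ordered += [n for n in range(1, MAX_NUM + 1) if counts[n - 1] == f]
--     bets = []
--     rest = ordered
--     k = num_bets
--     while k > 0:
--         bets.append(sorted(rest[:PICK]))
--         rest = rest[PICK:]
--         k -= 1
--     return bets
-- ===== Notes on version B (the rewrite author's own statement) =====
-- stated objective: alternative
-- what changed: Replaces A's Counter plus stable key-sort of 1..49 with a counting sort that scans candidate frequencies 0..len(nums) in ascending order (collecting numbers in ascending order per frequency, which is exactly the stable tie-break) over a plain per-number count list, and replaces A's indexed slice loop over range(num_bets) with an iterative while loop that peels each bet off the front of the order and drops it.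
-- outside the precondition, e.g. on strat_cold_complement([{'nums': [1, 2]}], 2): A raises KeyError, B raises KeyError
import Mathlib
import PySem

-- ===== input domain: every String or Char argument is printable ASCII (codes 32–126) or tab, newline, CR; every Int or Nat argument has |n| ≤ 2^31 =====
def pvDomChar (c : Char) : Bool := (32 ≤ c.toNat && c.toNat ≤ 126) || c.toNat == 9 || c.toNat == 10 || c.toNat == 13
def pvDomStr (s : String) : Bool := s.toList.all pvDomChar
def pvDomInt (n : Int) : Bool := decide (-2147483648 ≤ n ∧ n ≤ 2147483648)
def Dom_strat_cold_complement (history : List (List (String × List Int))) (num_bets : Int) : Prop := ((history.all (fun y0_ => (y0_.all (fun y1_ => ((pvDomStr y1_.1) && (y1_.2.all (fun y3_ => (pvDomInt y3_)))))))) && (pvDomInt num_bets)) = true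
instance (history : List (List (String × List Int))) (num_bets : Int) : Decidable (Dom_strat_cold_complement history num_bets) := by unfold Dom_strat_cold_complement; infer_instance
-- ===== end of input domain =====

-- B replaces A's key-sort of 1..49 by a counting sort scanning frequencies 0..len(nums)
-- ascending, and peels bets off the front of the order iteratively (objective: alternative).

-- ===== PORT A =====
def strat_cold_complement (history : List (List (String × List Int))) (num_bets : Int) : List (List Int) :=
  let window : Int := min 100 (PySem.List.len history)
  let recent := PySem.List.slice history (some (-window)) none
  -- d['numbers'] ported total as getD; the KeyError inputs are excluded by Pre_
  let allNums : List Int := recent.flatMap (fun d => (PySem.Dict.mk d).getD "numbers" [])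
  let freq := PySem.Dict.counter allNums
  let sortedNums := PySem.List.sorted (PySem.List.pyRange 1 (49 + 1) 1) (fun x => freq.getD x 0)
  (PySem.List.pyRange 0 num_bets 1).foldl (fun bets i =>
    bets ++ [PySem.List.sorted (PySem.List.slice sortedNums (some (i * 6)) (some ((i + 1) * 6))) (fun x => x)]) []

-- ===== PORT B =====
-- the 'while k > 0' loop of Source B: take a sorted first-6 slice, drop 6, decrement
def pvPeelBets (rest : List Int) (k : Int) : List (List Int) :=
  if hk : 0 < k then
    PySem.List.sorted (PySem.List.slice rest none (some 6)) (fun x => x)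
      :: pvPeelBets (PySem.List.slice rest (some 6) none) (k - 1)
  else []
termination_by k.toNat
decreasing_by omega

def strat_cold_complement_alt (history : List (List (String × List Int))) (num_bets : Int) : List (List Int) :=
  let window : Int := min 100 (PySem.List.len history)
  let recent := PySem.List.slice history (some (PySem.List.len history - window)) none
  -- d['numbers'] ported total as getD; the KeyError inputs are excluded by Pre_
  let nums : List Int := recent.foldl (fun acc d => acc ++ (PySem.Dict.mk d).getD "numbers" []) []
  let counts : List Int := (PySem.List.pyRange 1 (49 + 1) 1).map (fun m => (nums.count m : Int))
  let ordered : List Int := (PySem.List.pyRange 0 (PySem.List.len nums + 1) 1).foldl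
      (fun acc f => acc ++ (PySem.List.pyRange 1 (49 + 1) 1).filter
        (fun n => PySem.List.pyGetD counts (n - 1) 0 == f)) []
  pvPeelBets ordered num_bets

-- ===== PRECONDITION & SPEC =====
-- Pre_ excludes exactly the inputs where some draw in the examined window lacks the
-- key "numbers", on which Python A raises KeyError (B raises there too).
def Pre_strat_cold_complement (history : List (List (String × List Int))) (num_bets : Int) : Prop :=
  (PySem.List.slice history (some (-(min 100 (PySem.List.len history)))) none).all
    (fun d => (PySem.Dict.mk d).contains "numbers") = true
instance (history : List (List (String × List Int))) (num_bets : Int) : Decidable (Pre_strat_cold_complement history num_bets) := by unfold Pre_strat_cold_complement; infer_instance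

def pvWitness_strat_cold_complement : (List (List (String × List Int))) × Int :=
  ([[("numbers", [7, 7, 3])], [("numbers", [1, 2, 3])]], 2)

def Spec_strat_cold_complement (history : List (List (String × List Int))) (num_bets : Int) (out : List (List Int)) : Prop := out = strat_cold_complement_alt history num_bets
instance (history : List (List (String × List Int))) (num_bets : Int) (out : List (List Int)) : Decidable (Spec_strat_cold_complement history num_bets out) := by unfold Spec_strat_cold_complement; infer_instance

-- ===== CLAIM (what is proved, stated in full; the proofs are below) =====
def Claim_equal_strat_cold_complement : Prop := ∀ (history : List (List (String × List Int))) (num_bets : Int), Dom_strat_cold_complement history num_bets → Pre_strat_cold_complement history num_bets → Spec_strat_cold_complement history num_bets (strat_cold_complement history num_bets)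

-- ===== LEMMAS AND PROOFS =====

def lexR (key : Int → Int) (a b : Int) : Prop := key a < key b ∨ (key a = key b ∧ a < b)

theorem insertBy_pairwise_perm (key : Int → Int) (x : Int) :
    ∀ (acc : List Int), acc.Pairwise (lexR key) → (∀ y ∈ acc, y < x) →
      (PySem.List.insertBy (fun a b => decide (key a < key b)) x acc).Pairwise (lexR key) ∧
      (PySem.List.insertBy (fun a b => decide (key a < key b)) x acc).Perm (x :: acc) := by
  intro acc
  induction acc with
  | nil => intro _ _; simp [PySem.List.insertBy, lexR]
  | cons y ys ih =>
    intro hp hlt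
    rw [List.pairwise_cons] at hp
    by_cases h : key x < key y
    · rw [PySem.List.insertBy]
      simp only [h, decide_true, if_true]
      constructor
      · refine List.Pairwise.cons ?_ (List.Pairwise.cons hp.1 hp.2)
        intro z hz
        rcases List.mem_cons.mp hz with rfl | hz
        · exact Or.inl h
        · exact Or.inl (lt_of_lt_of_le h (by rcases hp.1 z hz with h' | ⟨h', _⟩ <;> omega))
      · exact List.Perm.refl _
    · rw [PySem.List.insertBy]
      simp only [h, decide_false]
      obtain ⟨ihp, ihperm⟩ := ih hp.2 (fun z hz => hlt z (List.mem_cons_of_mem _ hz))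
      constructor
      · refine List.Pairwise.cons ?_ ihp
        intro z hz
        rcases (PySem.List.mem_insertBy _ _ _ _).mp hz with hzx | hz
        · rw [hzx]
          have hy : y < x := hlt y (List.mem_cons_self)
          rcases lt_or_eq_of_le (not_lt.mp h) with h' | h'
          · exact Or.inl h'
          · exact Or.inr ⟨h', hy⟩
        · exact hp.1 z hz
      · exact (List.Perm.cons y ihperm).trans (List.Perm.swap x y ys)

theorem sorted_pairwise_lexR (key : Int → Int) :
    ∀ (xs : List Int), xs.Pairwise (· < ·) →
      (PySem.List.sorted xs key).Pairwise (lexR key) := by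
  intro xs
  induction xs using List.reverseRecOn with
  | nil => intro _; simp [PySem.List.sorted_eq_foldl_insertBy]
  | append_singleton ys x ih =>
    intro hp
    rw [List.pairwise_append] at hp
    have hys := hp.1
    have hlt : ∀ y ∈ PySem.List.sorted ys key, y < x := by
      intro y hy
      exact hp.2.2 y ((PySem.List.mem_sorted _ _ _ _).mp hy) x List.mem_cons_self
    have : PySem.List.sorted (ys ++ [x]) key
        = PySem.List.insertBy (fun a b => decide (key a < key b)) x (PySem.List.sorted ys key) := by
      rw [PySem.List.sorted_eq_foldl_insertBy, PySem.List.sorted_eq_foldl_insertBy, List.foldl_append]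
      simp
    rw [this]
    exact (insertBy_pairwise_perm key x _ (ih hys) hlt).1

theorem flatMap_filter_pairwise (key : Int → Int) (xs : List Int) (hxs : xs.Pairwise (· < ·)) :
    ∀ (F : List Int), F.Pairwise (· < ·) →
      (F.flatMap (fun f => xs.filter (fun n => key n == f))).Pairwise (lexR key) := by
  intro F
  induction F with
  | nil => intro _; simp
  | cons f F ih =>
    intro hF
    rw [List.pairwise_cons] at hF
    rw [List.flatMap_cons, List.pairwise_append]
    refine ⟨?_, ih hF.2, ?_⟩
    · refine (List.Pairwise.filter _ hxs).imp_of_mem ?_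
      intro a b ha hb hab
      exact Or.inr ⟨by
        have := (List.mem_filter.mp ha).2
        have := (List.mem_filter.mp hb).2
        simp_all, hab⟩
    · intro a ha b hb
      obtain ⟨g, hg, hbg⟩ := List.mem_flatMap.mp hb
      have hka : key a = f := by simpa using (List.mem_filter.mp ha).2
      have hkb : key b = g := by simpa using (List.mem_filter.mp hbg).2
      exact Or.inl (by rw [hka, hkb]; exact hF.1 g hg)

theorem flatMap_ite_perm {g : Int → List Int} (v c : Int) :
    ∀ (F : List Int), F.Nodup → c ∈ F →
      (F.flatMap (fun f => if c = f then v :: g f else g f)).Perm (v :: F.flatMap g) := by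
  intro F
  induction F with
  | nil => intro _ h; simp at h
  | cons f F ih =>
    intro hnd hc
    rw [List.nodup_cons] at hnd
    rw [List.flatMap_cons, List.flatMap_cons]
    by_cases h : c = f
    · subst h
      have he : F.flatMap (fun f' => if c = f' then v :: g f' else g f') = F.flatMap g := by
        apply List.flatMap_congr
        intro f' hf'
        have hne : c ≠ f' := fun hcf => hnd.1 (hcf ▸ hf')
        simp [hne]
      rw [he]
      simp
    · simp only [h, if_false]
      have hcF : c ∈ F := by
        rcases List.mem_cons.mp hc with h' | h'
        · exact absurd h' h
        · exact h'
      exact (List.Perm.append_left _ (ih hnd.2 hcF)).trans List.perm_middle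

theorem flatMap_filter_perm (key : Int → Int) (F : List Int) (hnd : F.Nodup) :
    ∀ (xs : List Int), (∀ n ∈ xs, key n ∈ F) →
      (F.flatMap (fun f => xs.filter (fun n => key n == f))).Perm xs := by
  intro xs
  induction xs with
  | nil => intro _; simp
  | cons x xs ih =>
    intro hmem
    have hx : key x ∈ F := hmem x List.mem_cons_self
    have hstep : (fun f => (x :: xs).filter (fun n => key n == f))
        = fun f => if key x = f then x :: xs.filter (fun n => key n == f)
                   else xs.filter (fun n => key n == f) := by
      funext f
      by_cases h : key x = f
      · simp [h]
      · simp [h]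
    rw [hstep]
    exact (flatMap_ite_perm x (key x) F hnd hx).trans
      (List.Perm.cons x (ih (fun n hn => hmem n (List.mem_cons_of_mem _ hn))))

theorem sorted_eq_flatMap_filter (key : Int → Int) (xs F : List Int)
    (hxs : xs.Pairwise (· < ·)) (hnd : F.Nodup) (hF : F.Pairwise (· < ·))
    (hmem : ∀ n ∈ xs, key n ∈ F) :
    PySem.List.sorted xs key = F.flatMap (fun f => xs.filter (fun n => key n == f)) := by
  refine List.Perm.eq_of_pairwise (l₁ := PySem.List.sorted xs key) ?_ (sorted_pairwise_lexR key xs hxs)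
    (flatMap_filter_pairwise key xs hxs F hF)
    ((PySem.List.sorted_perm xs key false).trans (flatMap_filter_perm key F hnd xs hmem).symm)
  intro a b _ _ h1 h2
  unfold lexR at h1 h2
  omega

theorem recent_slices_eq (history : List (List (String × List Int))) :
    PySem.List.slice history (some (-(min 100 (PySem.List.len history)))) none =
    PySem.List.slice history (some (PySem.List.len history - min 100 (PySem.List.len history))) none := by
  rcases history with _ | ⟨d, hs⟩
  · rfl
  · have h1 : min 100 (PySem.List.len (d :: hs)) = ((min 100 (d :: hs).length : Nat) : Int) := by
      rw [PySem.List.len_eq]; omega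
    have hk0 : 0 < min 100 (d :: hs).length := by simp
    have h2 : PySem.List.len (d :: hs) - ((min 100 (d :: hs).length : Nat) : Int)
        = (((d :: hs).length - min 100 (d :: hs).length : Nat) : Int) := by
      rw [PySem.List.len_eq]
      have : min 100 (d :: hs).length ≤ (d :: hs).length := min_le_right _ _
      omega
    rw [h1, h2, PySem.List.slice_from_neg_natCast _ _ hk0, PySem.List.slice_from_natCast]

-- B's counts-list lookup counts[n-1] is the count of n, for n in the scanned range
theorem counts_get (nums : List Int) (n : Int) (h1 : 1 ≤ n) (h2 : n < 50) :
    PySem.List.pyGetD ((PySem.List.pyRange 1 (49 + 1) 1).map (fun m => (nums.count m : Int))) (n - 1) 0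
      = (nums.count n : Int) := by
  have hn1 : n - 1 = (((n - 1).toNat : Nat) : Int) := by omega
  rw [hn1, PySem.List.pyGetD_map_pyRange_one (fun m => (nums.count m : Int)) 1 (49 + 1) (n - 1).toNat 0 (by omega)]
  have : (1 : Int) + ((n - 1).toNat : Int) = n := by omega
  rw [this]

-- A's key-sort of 1..49 equals B's counting-sort scan of frequencies 0..len(nums)
theorem core (nums : List Int) :
    PySem.List.sorted (PySem.List.pyRange 1 (49 + 1) 1) (fun x => (PySem.Dict.counter nums).getD x 0)
    = (PySem.List.pyRange 0 (PySem.List.len nums + 1) 1).flatMap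
        (fun f => (PySem.List.pyRange 1 (49 + 1) 1).filter
          (fun n => PySem.List.pyGetD ((PySem.List.pyRange 1 (49 + 1) 1).map (fun m => (nums.count m : Int))) (n - 1) 0 == f)) := by
  have hkey : (fun x : Int => (PySem.Dict.counter nums).getD x 0) = fun x : Int => (nums.count x : Int) :=
    funext (fun x => PySem.Dict.getD_counter nums x)
  rw [hkey]
  have hfilt : (fun f : Int => (PySem.List.pyRange 1 (49 + 1) 1).filter
        (fun n => PySem.List.pyGetD ((PySem.List.pyRange 1 (49 + 1) 1).map (fun m => (nums.count m : Int))) (n - 1) 0 == f))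
      = fun f : Int => (PySem.List.pyRange 1 (49 + 1) 1).filter (fun n => (nums.count n : Int) == f) := by
    funext f
    apply List.filter_congr
    intro n hn
    have hmem := (PySem.List.mem_pyRange_one).mp hn
    rw [counts_get nums n hmem.1 (by omega)]
  rw [hfilt]
  refine sorted_eq_flatMap_filter _ _ _ (PySem.List.pairwise_lt_pyRange_one 1 (49 + 1))
    (PySem.List.nodup_pyRange_one 0 (PySem.List.len nums + 1))
    (PySem.List.pairwise_lt_pyRange_one 0 (PySem.List.len nums + 1)) ?_
  intro n _
  rw [PySem.List.mem_pyRange_one]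
  have hle : nums.count n ≤ nums.length := List.count_le_length
  have hlen : PySem.List.len nums = (nums.length : Int) := PySem.List.len_eq nums
  omega

-- xs[6:] is drop 6
theorem slice_from6 (L : List Int) : PySem.List.slice L (some 6) none = L.drop 6 := by
  have h6 : (6 : Int) = ((6 : Nat) : Int) := rfl
  rw [h6, PySem.List.slice_from_natCast]

-- a first-6 / rest-of-6 slice of a dropped-by-6 list is the shifted slice of the original
theorem slice_drop6 (L : List Int) (j : Int) (hj : 0 ≤ j) :
    PySem.List.slice (L.drop 6) (some (j * 6)) (some ((j + 1) * 6))
      = PySem.List.slice L (some ((j + 1) * 6)) (some ((j + 2) * 6)) := by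
  have ha : j * 6 = ((j.toNat * 6 : Nat) : Int) := by push_cast; omega
  have hb : (j + 1) * 6 = (((j.toNat + 1) * 6 : Nat) : Int) := by push_cast; omega
  have hc : (j + 2) * 6 = (((j.toNat + 2) * 6 : Nat) : Int) := by push_cast; omega
  rw [ha, hb, hc, PySem.List.slice_natCast, PySem.List.slice_natCast, List.drop_drop]
  congr 1
  · omega
  · congr 1
    omega

-- the while-loop peel equals A's indexed-slice map
theorem peelBets_eq (kn : Nat) : ∀ (L : List Int) (k : Int), k.toNat = kn →
    pvPeelBets L k = (PySem.List.pyRange 0 k 1).map (fun i =>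
      PySem.List.sorted (PySem.List.slice L (some (i * 6)) (some ((i + 1) * 6))) (fun x => x)) := by
  induction kn with
  | zero =>
    intro L k hk
    rw [pvPeelBets]
    have hk0 : ¬ 0 < k := by omega
    rw [dif_neg hk0, PySem.List.pyRange_one_eq_nil (by omega), List.map_nil]
  | succ n ih =>
    intro L k hk
    rw [pvPeelBets]
    have hk0 : 0 < k := by omega
    rw [dif_pos hk0, PySem.List.pyRange_one_cons (by omega), List.map_cons, slice_from6]
    have ht : pvPeelBets (L.drop 6) (k - 1)
        = (PySem.List.pyRange (0 + 1) k 1).map (fun i =>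
            PySem.List.sorted (PySem.List.slice L (some (i * 6)) (some ((i + 1) * 6))) (fun x => x)) := by
      rw [ih (L.drop 6) (k - 1) (by omega), PySem.List.pyRange_one, PySem.List.pyRange_one,
          List.map_map, List.map_map]
      have hlen : (k - 1 - 0).toNat = (k - (0 + 1)).toNat := by omega
      rw [hlen]
      apply List.map_congr_left
      intro a _
      simp only [Function.comp_apply]
      have e1 : (0 : Int) + 1 + (a : Int) = (a : Int) + 1 := by ring
      have e2 : (0 : Int) + (a : Int) = (a : Int) := by ring
      rw [e1, e2, slice_drop6 L a (by omega)]
      have e3 : (a : Int) + 1 + 1 = (a : Int) + 2 := by ring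
      rw [e3]
    rw [ht]
    have hh : PySem.List.slice L (some ((0 : Int) * 6)) (some (((0 : Int) + 1) * 6))
        = PySem.List.slice L none (some 6) := by
      norm_num
    rw [hh]

-- ===== VERDICT (by name: the statement is the Claim_ definition above) =====
theorem strat_cold_complement_spec : Claim_equal_strat_cold_complement := by
  intro history num_bets _ _
  simp only [Spec_strat_cold_complement, strat_cold_complement, strat_cold_complement_alt]
  rw [recent_slices_eq]
  conv_rhs => rw [PySem.List.foldl_append_eq_flatMap]
  conv_rhs => rw [List.nil_append]
  conv_rhs => rw [PySem.List.foldl_append_eq_flatMap]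
  conv_rhs => rw [List.nil_append]
  rw [core, PySem.List.foldl_append_singleton_eq_map, List.nil_append,
      peelBets_eq num_bets.toNat _ num_bets rfl]
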